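-- pv_equiv track=rewrite | github.com/Choi-JJunho/BOJ | 프로그래머스/lv1/42840. 모의고사/모의고사.py | solution
-- ===== SOURCE A (Python) =====
-- def solution(answers):
--     a = [1, 2, 3, 4, 5]
--     b = [2, 1, 2, 3, 2, 4, 2, 5]
--     c = [3, 3, 1, 1, 2, 2, 4, 4, 5, 5]
--
--     dic = {1:0,2:0,3:0}
--
--     for i in range(len(answers)):
--         if a[i % len(a)] == answers[i]:
--             dic[1] += 1
--         if b[i % len(b)] == answers[i]:
--             dic[2] += 1
--         if c[i % len(c)] == answers[i]:
--             dic[3] += 1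
--
--     m = max(dic.values())
--     answer = []
--
--     for k, v in dic.items():
--         if v == m:
--             answer.append(k)
--
--     return answer
-- ===== SOURCE B (Python) =====
-- def solution(answers):
--     # The three patterns repeat with periods 5, 8, 10; lcm = 40.  Instead of
--     # comparing each answer against each pattern, build one histogram of
--     # (index mod 40, answer) pairs in a single pass, then score each pattern
--     # from the 40 buckets it reads.
--     cnt = {}
--     for i, x in enumerate(answers):
--         k = (i % 40, x)
--         cnt[k] = cnt.get(k, 0) + 1
--     patterns = [[1, 2, 3, 4, 5],
--                 [2, 1, 2, 3, 2, 4, 2, 5],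
--                 [3, 3, 1, 1, 2, 2, 4, 4, 5, 5]]
--     scores = [sum(cnt.get((r, p[r % len(p)]), 0) for r in range(40))
--               for p in patterns]
--     m = max(scores)
--     return [i + 1 for i, s in enumerate(scores) if s == m]
-- ===== Notes on version B (the rewrite author's own statement) =====
-- stated objective: alternative
-- what changed: Replaces A's per-element comparison against all three patterns with an aggregate-then-score algorithm: one pass builds a histogram keyed by (index mod 40, answer) -- 40 = lcm of the pattern periods -- and each pattern's score is then read off the 40 relevant buckets, so no answer is ever compared to a pattern value.
import Mathlib
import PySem

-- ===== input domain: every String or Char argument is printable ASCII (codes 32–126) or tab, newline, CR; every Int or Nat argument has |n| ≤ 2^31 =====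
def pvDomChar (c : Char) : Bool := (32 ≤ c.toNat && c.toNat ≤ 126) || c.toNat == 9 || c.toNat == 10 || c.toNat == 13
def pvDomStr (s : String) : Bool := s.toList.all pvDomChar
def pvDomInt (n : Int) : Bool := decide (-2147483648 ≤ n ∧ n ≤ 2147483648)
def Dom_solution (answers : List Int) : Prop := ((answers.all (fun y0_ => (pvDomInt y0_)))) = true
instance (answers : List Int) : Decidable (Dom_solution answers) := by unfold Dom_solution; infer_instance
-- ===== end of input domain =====

-- B replaces A's per-element comparison against the three patterns by an
-- aggregate-then-score algorithm: one pass builds a histogram keyed by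
-- (index mod 40, answer) (40 = lcm of the pattern periods) and each pattern's
-- score is read off its 40 buckets (alternative algorithm; same cost).

-- ===== PORT A =====
-- indexing a[i % len(a)] and answers[i] is always in range, so pyGetD with default 0 is exact
def solution (answers : List Int) : List Int :=
  let a : List Int := [1, 2, 3, 4, 5]
  let b : List Int := [2, 1, 2, 3, 2, 4, 2, 5]
  let c : List Int := [3, 3, 1, 1, 2, 2, 4, 4, 5, 5]
  let dic : PySem.Dict Int Int := PySem.Dict.ofList [(1, 0), (2, 0), (3, 0)]
  let dic := (PySem.List.pyRange 0 (answers.length : Int) 1).foldl (fun d i =>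
    let d := if PySem.List.pyGetD a (PySem.Int.mod i (a.length : Int)) 0 == PySem.List.pyGetD answers i 0
             then d.modify 1 0 (· + 1) else d
    let d := if PySem.List.pyGetD b (PySem.Int.mod i (b.length : Int)) 0 == PySem.List.pyGetD answers i 0
             then d.modify 2 0 (· + 1) else d
    if PySem.List.pyGetD c (PySem.Int.mod i (c.length : Int)) 0 == PySem.List.pyGetD answers i 0
    then d.modify 3 0 (· + 1) else d) dic
  -- max(dic.values()): values is never empty, so getD 0 is exact
  let m := (PySem.List.max? dic.values (fun v => v)).getD 0
  dic.items.foldl (fun answer kv => if kv.2 == m then answer ++ [kv.1] else answer) []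

-- ===== PORT B =====
-- cnt[k] = cnt.get(k, 0) + 1 is ported as d.insert k (d.getD k 0 + 1);
-- sum(generator) is a foldl with (+) over the range
def solution_alt (answers : List Int) : List Int :=
  let cnt : PySem.Dict (Int × Int) Int :=
    (PySem.List.enumerate answers 0).foldl
      (fun d q =>
        let k := (PySem.Int.mod q.1 40, q.2)
        d.insert k (d.getD k 0 + 1))
      (PySem.Dict.ofList [])
  let patterns : List (List Int) :=
    [[1, 2, 3, 4, 5], [2, 1, 2, 3, 2, 4, 2, 5], [3, 3, 1, 1, 2, 2, 4, 4, 5, 5]]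
  let scores : List Int := patterns.map (fun p =>
    (PySem.List.pyRange 0 40 1).foldl
      (fun s r => s + cnt.getD (r, PySem.List.pyGetD p (PySem.Int.mod r (p.length : Int)) 0) 0)
      0)
  let m := (PySem.List.max? scores (fun v => v)).getD 0
  (PySem.List.enumerate scores 0).foldl
    (fun answer q => if q.2 == m then answer ++ [q.1 + 1] else answer) []

-- ===== PRECONDITION & SPEC =====
def Spec_solution (answers : List Int) (out : List Int) : Prop := out = solution_alt answers
instance (answers : List Int) (out : List Int) : Decidable (Spec_solution answers out) := by unfold Spec_solution; infer_instance

-- ===== CLAIM (what is proved, stated in full; the proofs are below) =====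
def Claim_equal_solution : Prop := ∀ (answers : List Int), Dom_solution answers → Spec_solution answers (solution answers)

-- ===== LEMMAS AND PROOFS =====

-- ---- A side: the dict loop counts matches per pattern ----
def pvC1 (q : Int × Int) : Bool := PySem.List.pyGetD ([1,2,3,4,5] : List Int) (PySem.Int.mod q.1 5) 0 == q.2
def pvC2 (q : Int × Int) : Bool := PySem.List.pyGetD ([2,1,2,3,2,4,2,5] : List Int) (PySem.Int.mod q.1 8) 0 == q.2
def pvC3 (q : Int × Int) : Bool := PySem.List.pyGetD ([3,3,1,1,2,2,4,4,5,5] : List Int) (PySem.Int.mod q.1 10) 0 == q.2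

def pvStep (d : PySem.Dict Int Int) (q : Int × Int) : PySem.Dict Int Int :=
  let d := if pvC1 q then d.modify 1 0 (· + 1) else d
  let d := if pvC2 q then d.modify 2 0 (· + 1) else d
  if pvC3 q then d.modify 3 0 (· + 1) else d

lemma pvStep_mk (x y z : Int) (q : Int × Int) :
    pvStep (PySem.Dict.mk [(1, x), (2, y), (3, z)]) q =
      PySem.Dict.mk [(1, x + (if pvC1 q then 1 else 0)),
                     (2, y + (if pvC2 q then 1 else 0)),
                     (3, z + (if pvC3 q then 1 else 0))] := by
  unfold pvStep
  split_ifs <;> simp [PySem.Dict.modify] <;> rfl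

lemma pvLoop (E : List (Int × Int)) (x y z : Int) :
    E.foldl pvStep (PySem.Dict.mk [(1, x), (2, y), (3, z)]) =
      PySem.Dict.mk [(1, x + (E.countP pvC1 : Int)),
                     (2, y + (E.countP pvC2 : Int)),
                     (3, z + (E.countP pvC3 : Int))] := by
  induction E generalizing x y z with
  | nil => simp
  | cons q E ih =>
    rw [List.foldl_cons, pvStep_mk, ih]
    simp only [List.countP_cons]
    congr 2 <;> [skip; congr 1] <;> · split_ifs <;> simp <;> omega

def pvFinish (dic : PySem.Dict Int Int) : List Int :=
  let m := (PySem.List.max? dic.values (fun v => v)).getD 0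
  dic.items.foldl (fun answer kv => if kv.2 == m then answer ++ [kv.1] else answer) []

def pvPick (scores : List Int) : List Int :=
  let m := (PySem.List.max? scores (fun v => v)).getD 0
  (PySem.List.enumerate scores 0).foldl
    (fun answer q => if q.2 == m then answer ++ [q.1 + 1] else answer) []

lemma pvFinish_mk (s1 s2 s3 : Int) :
    pvFinish (PySem.Dict.mk [(1, s1), (2, s2), (3, s3)]) = pvPick [s1, s2, s3] := by
  simp [pvFinish, pvPick, PySem.Dict.values,
        PySem.List.enumerate_cons, List.foldl]

lemma pvEnum (answers : List Int) :
    PySem.List.enumerate answers 0 =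
      (PySem.List.pyRange 0 ((answers.length : Int)) 1).map
        (fun j => (j, PySem.List.pyGetD answers j 0)) := by
  simpa using PySem.List.enumerate_eq_map_pyRange (xs := answers) (d := 0)

-- ---- B side: the histogram counts key-occurrences, and the 40-bucket sum
-- ---- collapses back to a per-element count ----
def pvKey (q : Int × Int) : Int × Int := (PySem.Int.mod q.1 40, q.2)

def pvHStep (d : PySem.Dict (Int × Int) Int) (q : Int × Int) : PySem.Dict (Int × Int) Int :=
  d.insert (pvKey q) (d.getD (pvKey q) 0 + 1)

lemma pvHist (E : List (Int × Int)) (d : PySem.Dict (Int × Int) Int) (k : Int × Int) :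
    (E.foldl pvHStep d).getD k 0 = d.getD k 0 + (E.countP (fun q => pvKey q == k) : Int) := by
  induction E generalizing d with
  | nil => simp
  | cons q E ih =>
    rw [List.foldl_cons, ih]
    unfold pvHStep
    rw [PySem.Dict.getD_insert]
    simp only [List.countP_cons, beq_iff_eq]
    by_cases h : k = pvKey q
    · simp [h]; ring
    · have h' : ¬ (pvKey q = k) := fun e => h e.symm
      simp [h, h']

lemma pvRangeSum (n t : Nat) (c : Int) :
    (((List.range n).map (fun j : Nat => (j : Int))).map
        (fun j : Int => if (t : Int) == j then c else 0)).sum =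
      if t < n then c else 0 := by
  induction n with
  | zero => simp
  | succ n ih =>
    rw [List.range_succ, List.map_append, List.map_append, List.sum_append, ih]
    by_cases h : t < n
    · have ht : ¬ ((t : Int) = (n : Int)) := by omega
      simp [h, Nat.lt_succ_of_lt h, ht]
    · by_cases h2 : t = n
      · subst h2; simp [h]
      · have ht : ¬ ((t : Int) = (n : Int)) := by omega
        have h3 : ¬ t < n + 1 := by omega
        simp [h, h3, ht]

lemma pvOne (f : Int → Int) (q : Int × Int) :
    ((PySem.List.pyRange 0 40 1).map
        (fun r => (if pvKey q == (r, f r) then (1 : Int) else 0))).sum =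
      if q.2 == f (PySem.Int.mod q.1 40) then 1 else 0 := by
  have h0 : (0:Int) < 40 := by norm_num
  set m := PySem.Int.mod q.1 40 with hm
  have hnn : 0 ≤ m := PySem.Int.mod_nonneg q.1 h0
  have hlt : m < 40 := PySem.Int.mod_lt q.1 h0
  have hcast : m = (m.toNat : Int) := (Int.toNat_of_nonneg hnn).symm
  have htlt : m.toNat < 40 := by omega
  rw [show ((40:Int)) = ((40:Nat) : Int) from by norm_num, PySem.List.pyRange_zero_natCast]
  have hmap : ∀ r ∈ (List.range 40).map (fun j : Nat => (j : Int)),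
      (fun r => (if pvKey q == (r, f r) then (1 : Int) else 0)) r =
        (fun r : Int => if (m.toNat : Int) == r then (if q.2 == f m then (1 : Int) else 0) else 0) r := by
    intro r _
    have hk : pvKey q = (m, q.2) := by unfold pvKey; rw [← hm]
    simp only [hk]
    have hb : ((m, q.2) == (r, f r)) = (m == r && q.2 == f r) := rfl
    rw [hb]
    by_cases hj : m = r
    · subst hj
      have h1 : ((m.toNat : Int) == m) = true := by rw [beq_iff_eq]; omega
      simp only [h1, beq_self_eq_true, Bool.true_and, if_true]
    · have h1 : (m == r) = false := by rw [beq_eq_false_iff_ne]; exact hj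
      have h2 : ((m.toNat : Int) == r) = false := by rw [beq_eq_false_iff_ne]; omega
      simp only [h1, h2, Bool.false_and, Bool.false_eq_true, if_false]
  rw [List.map_congr_left hmap, pvRangeSum]
  simp [htlt]

lemma pvSum (E : List (Int × Int)) (f : Int → Int) :
    ((PySem.List.pyRange 0 40 1).map
        (fun r => (E.countP (fun q => pvKey q == (r, f r)) : Int))).sum =
      (E.countP (fun q => q.2 == f (PySem.Int.mod q.1 40)) : Int) := by
  induction E with
  | nil => simp
  | cons q E ih =>
    simp only [List.countP_cons, Nat.cast_add, Nat.cast_ite, Nat.cast_one, Nat.cast_zero]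
    rw [PySem.List.sum_map_add_int, ih, pvOne]

lemma pvModFold (i : Int) (L : Int) (hL : 0 < L) (hdvd : L ∣ 40) :
    PySem.Int.mod (PySem.Int.mod i 40) L = PySem.Int.mod i L := by
  rw [PySem.Int.mod_eq_emod_of_pos hL, PySem.Int.mod_eq_emod_of_pos hL,
      PySem.Int.mod_eq_emod_of_pos (show (0:Int) < 40 by norm_num),
      Int.emod_emod_of_dvd _ hdvd]

-- one pattern's bucket sum is its match count
lemma pvScore (E : List (Int × Int)) (p : List Int) (L : Int)
    (hL : 0 < L) (hdvd : L ∣ 40) :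
    (PySem.List.pyRange 0 40 1).foldl
      (fun s r => s + (E.foldl pvHStep (PySem.Dict.ofList [])).getD
        (r, PySem.List.pyGetD p (PySem.Int.mod r L) 0) 0) 0
    = (E.countP (fun q => PySem.List.pyGetD p (PySem.Int.mod q.1 L) 0 == q.2) : Int) := by
  rw [PySem.List.foldl_add, zero_add]
  have hmap : ∀ r ∈ PySem.List.pyRange 0 40 1,
      (E.foldl pvHStep (PySem.Dict.ofList [])).getD
        (r, PySem.List.pyGetD p (PySem.Int.mod r L) 0) 0 =
      ((E.countP (fun q => pvKey q == (r, PySem.List.pyGetD p (PySem.Int.mod r L) 0)) : Nat) : Int) := by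
    intro r _
    rw [pvHist]
    have hz : (PySem.Dict.ofList ([] : List ((Int × Int) × Int))).getD
        (r, PySem.List.pyGetD p (PySem.Int.mod r L) 0) 0 = 0 := rfl
    rw [hz, zero_add]
  rw [List.map_congr_left hmap, pvSum E (fun r => PySem.List.pyGetD p (PySem.Int.mod r L) 0)]
  congr 1
  apply List.countP_congr
  intro q _
  rw [pvModFold q.1 L hL hdvd, Bool.beq_comm]

-- ===== VERDICT (by name: the statement is the Claim_ definition above) =====
theorem solution_spec : Claim_equal_solution := by
  intro answers _
  show solution answers = solution_alt answers
  have h1 : solution answers =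
      pvFinish ((PySem.List.enumerate answers 0).foldl pvStep
        (PySem.Dict.mk [(1, 0), (2, 0), (3, 0)])) := by
    rw [pvEnum, List.foldl_map]; rfl
  have h2 : solution_alt answers =
      pvPick [(PySem.List.pyRange 0 40 1).foldl
                (fun s r => s + ((PySem.List.enumerate answers 0).foldl pvHStep (PySem.Dict.ofList [])).getD
                  (r, PySem.List.pyGetD ([1,2,3,4,5] : List Int) (PySem.Int.mod r 5) 0) 0) 0,
              (PySem.List.pyRange 0 40 1).foldl
                (fun s r => s + ((PySem.List.enumerate answers 0).foldl pvHStep (PySem.Dict.ofList [])).getD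
                  (r, PySem.List.pyGetD ([2,1,2,3,2,4,2,5] : List Int) (PySem.Int.mod r 8) 0) 0) 0,
              (PySem.List.pyRange 0 40 1).foldl
                (fun s r => s + ((PySem.List.enumerate answers 0).foldl pvHStep (PySem.Dict.ofList [])).getD
                  (r, PySem.List.pyGetD ([3,3,1,1,2,2,4,4,5,5] : List Int) (PySem.Int.mod r 10) 0) 0) 0] := rfl
  rw [h1, h2, pvLoop, pvFinish_mk]
  rw [pvScore _ _ 5 (by norm_num) (by norm_num),
      pvScore _ _ 8 (by norm_num) (by norm_num),
      pvScore _ _ 10 (by norm_num) (by norm_num)]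
  simp only [zero_add]
  rfl
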